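-- pv_equiv track=rewrite | github.com/nu-dialogue/UniPPN | dataset/multiwoz23.py | estimate_booking_domain
-- ===== SOURCE A (Python) =====
-- from typing import List, Dict, Tuple, Optional, Generator
--
-- def estimate_booking_domain(active_domains_history: List[List[str]]) -> Optional[str]:
--     def trial(target_domains: List[str]):
--         for active_domains in active_domains_history[::-1]:
--             for domain in active_domains[::-1]:
--                 if domain in target_domains:
--                     return domain
--         return None
--     # 1. Check main booking domains
--     booking_domain = trial(["Hotel", "Restaurant", "Train"])
--     if booking_domain:
--         return booking_domain
--
--     # 2. Check other booking domains
--     booking_domain = trial(["Taxi", "Attraction"])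
--     if booking_domain:
--         return booking_domain
--
--     booking_domain = trial(["Hospital"])
--     if booking_domain:
--         return booking_domain
--
--     raise ValueError("Failed to estimate booking domain")
-- ===== SOURCE B (Python) =====
-- def estimate_booking_domain(active_domains_history):
--     g1 = ("Hotel", "Restaurant", "Train")
--     g2 = ("Taxi", "Attraction")
--     g3 = ("Hospital",)
--     found1 = found2 = found3 = None
--     for active_domains in reversed(active_domains_history):
--         for domain in reversed(active_domains):
--             if found1 is None and domain in g1:
--                 found1 = domain
--             elif found2 is None and domain in g2:
--                 found2 = domain
--             elif found3 is None and domain in g3: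
--                 found3 = domain
--     if found1 is not None:
--         return found1
--     if found2 is not None:
--         return found2
--     if found3 is not None:
--         return found3
--     raise ValueError("Failed to estimate booking domain")
-- ===== Notes on version B (the rewrite author's own statement) =====
-- stated objective: alternative
-- what changed: Replaces A's three separate reverse scans (one per priority group) by a single reverse pass that fills three slots, one per disjoint group, on first hit.
import Mathlib
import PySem

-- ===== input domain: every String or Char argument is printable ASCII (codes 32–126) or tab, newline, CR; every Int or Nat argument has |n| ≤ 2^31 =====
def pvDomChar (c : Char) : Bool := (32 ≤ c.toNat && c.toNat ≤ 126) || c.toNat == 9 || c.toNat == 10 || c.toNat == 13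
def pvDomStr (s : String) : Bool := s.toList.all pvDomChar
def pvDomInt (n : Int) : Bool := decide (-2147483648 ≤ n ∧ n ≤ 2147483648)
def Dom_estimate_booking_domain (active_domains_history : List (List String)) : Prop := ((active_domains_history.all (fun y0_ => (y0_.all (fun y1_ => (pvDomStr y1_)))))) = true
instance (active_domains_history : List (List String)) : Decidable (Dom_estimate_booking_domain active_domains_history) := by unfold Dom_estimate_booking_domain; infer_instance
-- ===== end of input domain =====

-- B replaces A's three separate reverse scans (one per priority group) by one reverse pass
-- filling three slots; equivalence of return values is proved on Pre_ (A raises outside it).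

-- ===== PORT A =====
-- inner loop of trial: 'for domain in active_domains[::-1]: if domain in target_domains: return domain'
def pvTrialInner (target : List String) : List String → Option String
  | [] => none
  | d :: ds => if target.contains d then some d else pvTrialInner target ds

-- outer loop of trial over active_domains_history[::-1] ([::-1] ported as List.reverse, exact)
def pvTrialOuter (target : List String) : List (List String) → Option String
  | [] => none
  | ads :: rest =>
    match pvTrialInner target ads.reverse with
    | some d => some d
    | none => pvTrialOuter target rest

-- Python truthiness of an Optional[str]: None and "" are falsy
def pvTruthyOptStr : Option String → Bool
  | some s => !(s == "")
  | none => false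

def estimate_booking_domain (active_domains_history : List (List String)) : Option String :=
  let b1 := pvTrialOuter ["Hotel", "Restaurant", "Train"] active_domains_history.reverse
  if pvTruthyOptStr b1 then b1
  else
    let b2 := pvTrialOuter ["Taxi", "Attraction"] active_domains_history.reverse
    if pvTruthyOptStr b2 then b2
    else
      let b3 := pvTrialOuter ["Hospital"] active_domains_history.reverse
      if pvTruthyOptStr b3 then b3
      else none  -- Python: raise ValueError("Failed to estimate booking domain"); excluded by Pre_

-- ===== PORT B =====
-- one step of B's single reverse pass: the if/elif chain filling the three slots
def pvStepB (st : Option String × Option String × Option String) (d : String) :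
    Option String × Option String × Option String :=
  match st with
  | (f1, f2, f3) =>
    if f1.isNone && (["Hotel", "Restaurant", "Train"] : List String).contains d then (some d, f2, f3)
    else if f2.isNone && (["Taxi", "Attraction"] : List String).contains d then (f1, some d, f3)
    else if f3.isNone && (["Hospital"] : List String).contains d then (f1, f2, some d)
    else (f1, f2, f3)

def estimate_booking_domain_alt (active_domains_history : List (List String)) : Option String :=
  let st := active_domains_history.reverse.foldl
    (fun st ads => ads.reverse.foldl pvStepB st) (none, none, none)
  match st with
  | (some d, _, _) => some d
  | (none, some d, _) => some d
  | (none, none, f3) => f3  -- none here = B raises ValueError, excluded by Pre_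

-- ===== PRECONDITION & SPEC =====
-- Pre_ excludes exactly the inputs containing no recognised domain, on which A (and B) raise ValueError.
def Pre_estimate_booking_domain (active_domains_history : List (List String)) : Prop :=
  ∃ ads ∈ active_domains_history, ∃ d ∈ ads,
    d ∈ (["Hotel", "Restaurant", "Train", "Taxi", "Attraction", "Hospital"] : List String)
instance (active_domains_history : List (List String)) : Decidable (Pre_estimate_booking_domain active_domains_history) := by unfold Pre_estimate_booking_domain; infer_instance

def pvWitness_estimate_booking_domain : List (List String) := [["Hotel"]]

def Spec_estimate_booking_domain (active_domains_history : List (List String)) (out : Option String) : Prop := out = estimate_booking_domain_alt active_domains_history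
instance (active_domains_history : List (List String)) (out : Option String) : Decidable (Spec_estimate_booking_domain active_domains_history out) := by unfold Spec_estimate_booking_domain; infer_instance

-- ===== CLAIM (what is proved, stated in full; the proofs are below) =====
def Claim_equal_estimate_booking_domain : Prop := ∀ (active_domains_history : List (List String)), Dom_estimate_booking_domain active_domains_history → Pre_estimate_booking_domain active_domains_history → Spec_estimate_booking_domain active_domains_history (estimate_booking_domain active_domains_history)

-- ===== LEMMAS AND PROOFS =====

-- pvTrialInner distributes over append
theorem pvTrialInner_append (g l1 l2 : List String) :
    pvTrialInner g (l1 ++ l2) = (pvTrialInner g l1).or (pvTrialInner g l2) := by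
  induction l1 with
  | nil => simp [pvTrialInner]
  | cons d ds ih =>
    simp only [List.cons_append, pvTrialInner]
    split <;> simp [ih]

-- the nested loops of trial equal one scan over the reverse-flattened list
theorem pvTrialOuter_flatten (g : List String) (hs : List (List String)) :
    pvTrialOuter g hs = pvTrialInner g (hs.map List.reverse).flatten := by
  induction hs with
  | nil => simp [pvTrialOuter, pvTrialInner]
  | cons ads rest ih =>
    simp only [pvTrialOuter, List.map_cons, List.flatten_cons, pvTrialInner_append, ih]
    cases pvTrialInner g ads.reverse <;> simp [Option.or]

-- anything pvTrialInner returns is an element of the target list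
theorem pvTrialInner_mem (g l : List String) (d : String) :
    pvTrialInner g l = some d → g.contains d = true := by
  induction l with
  | nil => simp [pvTrialInner]
  | cons x xs ih =>
    simp only [pvTrialInner]
    split
    · intro h; cases h; assumption
    · exact ih

-- B's nested folds equal one fold over the reverse-flattened list
theorem pvFold_flatten (hs : List (List String)) (st : Option String × Option String × Option String) :
    hs.foldl (fun st ads => ads.reverse.foldl pvStepB st) st
      = (hs.map List.reverse).flatten.foldl pvStepB st := by
  induction hs generalizing st with
  | nil => rfl
  | cons ads rest ih =>
    simp only [List.foldl_cons, List.map_cons, List.flatten_cons, List.foldl_append]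
    exact ih _

-- one step acts independently on each slot (the three groups are disjoint)
theorem pvStepB_componentwise (a b c : Option String) (d : String) :
    pvStepB (a, b, c) d =
      ((if a.isNone && (["Hotel", "Restaurant", "Train"] : List String).contains d then some d else a),
       (if b.isNone && (["Taxi", "Attraction"] : List String).contains d then some d else b),
       (if c.isNone && (["Hospital"] : List String).contains d then some d else c)) := by
  cases h1 : (["Hotel", "Restaurant", "Train"] : List String).contains d <;>
  cases h2 : (["Taxi", "Attraction"] : List String).contains d <;>
  cases h3 : (["Hospital"] : List String).contains d <;>
  simp at h1 h2 h3
  · simp [pvStepB, h1, h2, h3]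
  · rcases h3 with rfl; cases c <;> simp [pvStepB]
  · rcases h2 with rfl | rfl <;> cases b <;> simp [pvStepB]
  · rcases h2 with rfl | rfl <;> simp at h3
  · rcases h1 with rfl | rfl | rfl <;> cases a <;> simp [pvStepB]
  · rcases h1 with rfl | rfl | rfl <;> simp at h3
  · rcases h1 with rfl | rfl | rfl <;> simp at h2
  · rcases h1 with rfl | rfl | rfl <;> simp at h2

-- a slot update commutes with 'or' against the rest of the scan
theorem pv_slot_or (d : String) (a r : Option String) (cond : Bool) :
    (if a.isNone && cond then some d else a).or r = a.or (if cond then some d else r) := by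
  cases a <;> cases cond <;> simp

-- invariant of B's single pass: each slot is its old value, else the first hit of its group
theorem pvFold_inv (L : List String) (a b c : Option String) :
    L.foldl pvStepB (a, b, c) =
      (a.or (pvTrialInner ["Hotel", "Restaurant", "Train"] L),
       b.or (pvTrialInner ["Taxi", "Attraction"] L),
       c.or (pvTrialInner ["Hospital"] L)) := by
  induction L generalizing a b c with
  | nil => simp [pvTrialInner]
  | cons d L ih =>
    simp only [List.foldl_cons, pvStepB_componentwise, ih, pvTrialInner, Prod.mk.injEq]
    refine ⟨pv_slot_or d a _ _, pv_slot_or d b _ _, pv_slot_or d c _ _⟩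

-- ===== VERDICT (by name: the statement is the Claim_ definition above) =====
theorem estimate_booking_domain_spec : Claim_equal_estimate_booking_domain := by
  unfold Claim_equal_estimate_booking_domain
  intro h _ hpre
  unfold Spec_estimate_booking_domain estimate_booking_domain estimate_booking_domain_alt
  rw [pvFold_flatten, pvFold_inv]
  set L := (h.reverse.map List.reverse).flatten with hL
  rw [pvTrialOuter_flatten, pvTrialOuter_flatten, pvTrialOuter_flatten, ← hL]
  -- a returned domain is never the empty string, so Python truthiness is just 'is not None'
  have m1 := pvTrialInner_mem ["Hotel", "Restaurant", "Train"] L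
  have m2 := pvTrialInner_mem ["Taxi", "Attraction"] L
  have m3 := pvTrialInner_mem ["Hospital"] L
  cases e1 : pvTrialInner ["Hotel", "Restaurant", "Train"] L with
  | some d =>
    have := m1 d e1
    have hne : d ≠ "" := by revert this; simp; rintro (rfl | rfl | rfl) <;> decide
    simp [pvTruthyOptStr, hne, Option.or]
  | none =>
    cases e2 : pvTrialInner ["Taxi", "Attraction"] L with
    | some d =>
      have := m2 d e2
      have hne : d ≠ "" := by revert this; simp; rintro (rfl | rfl) <;> decide
      simp [pvTruthyOptStr, hne, Option.or]
    | none =>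
      cases e3 : pvTrialInner ["Hospital"] L with
      | some d =>
        have := m3 d e3
        have hne : d ≠ "" := by revert this; simp; rintro rfl; decide
        simp [pvTruthyOptStr, hne, Option.or]
      | none => simp [pvTruthyOptStr, Option.or]
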